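-- pv_equiv track=rewrite | github.com/narendrasinghdangi/leetcode-problems | 2439-minimize-maximum-of-array/2439-minimize-maximum-of-array.py | check
-- ===== SOURCE A (Python) =====
-- def check(nums, k):
--     n = len(nums)
--     temp = 0
--     for i in range(n - 1, 0, -1):
--         if temp + nums[i] > k:
--             temp += nums[i] - k
--         else:
--             temp = 0
--     return False if temp + nums[0] > k else True
-- ===== SOURCE B (Python) =====
-- def check(nums, k):
--     total = 0
--     for i, x in enumerate(nums):
--         total += x
--         if total > (i + 1) * k:
--             return False
--     return True
-- ===== Notes on version B (the rewrite author's own statement) =====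
-- stated objective: simpler
-- what changed: Replaces A's backward carry-propagation loop over indices n-1..1 plus a final head test with a single forward pass over the elements that checks each running prefix sum against (i+1)*k, returning False early.
import Mathlib
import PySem

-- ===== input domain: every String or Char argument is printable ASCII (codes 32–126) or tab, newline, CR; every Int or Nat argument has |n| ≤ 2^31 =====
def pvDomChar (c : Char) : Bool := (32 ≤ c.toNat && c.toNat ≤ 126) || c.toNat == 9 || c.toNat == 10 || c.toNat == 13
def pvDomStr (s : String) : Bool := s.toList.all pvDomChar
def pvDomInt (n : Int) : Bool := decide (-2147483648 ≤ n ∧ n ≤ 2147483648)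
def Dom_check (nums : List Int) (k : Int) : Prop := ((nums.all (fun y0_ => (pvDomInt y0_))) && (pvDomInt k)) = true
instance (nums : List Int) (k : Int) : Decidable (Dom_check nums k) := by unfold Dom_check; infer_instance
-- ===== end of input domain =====

-- B replaces A's backward carry-propagation loop with a forward prefix-sum feasibility check ('simpler').
-- A's and B's side effects are identical (neither mutates its arguments).

-- ===== PORT A =====
-- backward loop over i = n-1, …, 1 carrying the excess; then the test at index 0
def check (nums : List Int) (k : Int) : Bool :=
  let n : Int := (nums.length : Int)
  let temp : Int :=
    (PySem.List.pyRange (n - 1) 0 (-1)).foldl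
      (fun temp i =>
        if temp + PySem.List.pyGetD nums i 0 > k then temp + PySem.List.pyGetD nums i 0 - k
        else 0) 0
  if temp + PySem.List.pyGetD nums 0 0 > k then false else true

-- ===== PORT B =====
-- forward pass: running total of the first i+1 elements, early False when it exceeds (i+1)*k
def checkAltGo (k : Int) : List Int → Int → Int → Bool
  | [], _, _ => true
  | x :: rest, i, total =>
      let total' := total + x
      if total' > (i + 1) * k then false else checkAltGo k rest (i + 1) total'

def check_alt (nums : List Int) (k : Int) : Bool := checkAltGo k nums 0 0

-- ===== PRECONDITION & SPEC =====
-- Pre_ excludes the empty list: there A reads nums[0] and raises IndexError.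
def Pre_check (nums : List Int) (k : Int) : Prop := nums ≠ []
instance (nums : List Int) (k : Int) : Decidable (Pre_check nums k) := by unfold Pre_check; infer_instance
def pvWitness_check : List Int × Int := ([1, 2, 3], 2)

def Spec_check (nums : List Int) (k : Int) (out : Bool) : Prop := out = check_alt nums k
instance (nums : List Int) (k : Int) (out : Bool) : Decidable (Spec_check nums k out) := by unfold Spec_check; infer_instance

-- ===== CLAIM (what is proved, stated in full; the proofs are below) =====
def Claim_equal_check : Prop := ∀ (nums : List Int) (k : Int), Dom_check nums k → Pre_check nums k → Spec_check nums k (check nums k)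

-- ===== LEMMAS AND PROOFS =====

-- the carry computed by A's loop, as a foldr over the tail
def carry (k : Int) (l : List Int) : Int :=
  l.foldr (fun x c => if c + x > k then c + x - k else 0) 0

-- A's loop over pyRange (n-1) 0 (-1) with pyGetD equals the foldr carry over the tail
theorem carry_nonneg (k : Int) (l : List Int) : 0 ≤ carry k l := by
  induction l with
  | nil => simp [carry]
  | cons x rest ih =>
    have hc : carry k (x :: rest) = if carry k rest + x > k then carry k rest + x - k else 0 := by
      simp [carry]
    rw [hc]; split_ifs with h <;> omega

theorem check_eq_carry (x : Int) (l : List Int) (k : Int) :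
    check (x :: l) k = (if carry k l + x > k then false else true) := by
  have hrev : PySem.List.pyRange (((x :: l).length : Int) - 1) 0 (-1)
      = (PySem.List.pyRange 1 ((x :: l).length : Int)).reverse := by
    simpa using PySem.List.pyRange_neg_one_eq_reverse (((x :: l).length : Int) - 1) 0
  have hmap : (PySem.List.pyRange 1 ((x :: l).length : Int)).map
      (fun j => PySem.List.pyGetD (x :: l) j 0) = (x :: l).drop 1 := by
    simpa using PySem.List.map_pyGetD_pyRange' (x :: l) (0 : Int) (a := 1) (by norm_num)
  simp only [check, carry]
  rw [hrev, List.foldl_reverse]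
  have hfold : ∀ (r : List Int),
      r.foldr (fun i temp => if temp + PySem.List.pyGetD (x :: l) i 0 > k
                 then temp + PySem.List.pyGetD (x :: l) i 0 - k else 0) 0
      = (r.map (fun j => PySem.List.pyGetD (x :: l) j 0)).foldr
          (fun y c => if c + y > k then c + y - k else 0) 0 := by
    intro r; rw [List.foldr_map]
  rw [hfold, hmap]
  simp

-- closed-form characterisation of the forward pass (B)
theorem checkAltGo_iff (k : Int) : ∀ (l : List Int) (i total : Int),
    checkAltGo k l i total = true ↔
      ∀ j : Nat, j < l.length → total + ((l.take (j + 1)).sum) ≤ (i + 1 + (j : Int)) * k := by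
  intro l
  induction l with
  | nil => intro i total; simp [checkAltGo]
  | cons x rest ih =>
    intro i total
    simp only [checkAltGo]
    by_cases h : total + x > (i + 1) * k
    · simp only [if_pos h]
      constructor
      · intro hf; exact absurd hf (by simp)
      · intro hall
        exfalso
        have h0 := hall 0 (by simp)
        simp only [List.take_succ_cons, List.take_zero, List.sum_cons, List.sum_nil,
          Nat.cast_zero, add_zero] at h0
        linarith
    · simp only [if_neg h]
      rw [ih]
      constructor
      · intro hall j hj
        cases j with
        | zero =>
          simp only [List.take_succ_cons, List.take_zero, List.sum_cons, List.sum_nil,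
            Nat.cast_zero, add_zero]
          linarith
        | succ m =>
          have hm := hall m (by simpa using Nat.lt_of_succ_lt_succ hj)
          simp only [List.take_succ_cons, List.sum_cons] at *
          push_cast at hm ⊢
          linarith
      · intro hall j hj
        have hm := hall (j + 1) (by simpa using Nat.succ_lt_succ hj)
        simp only [List.take_succ_cons, List.sum_cons] at hm
        push_cast at hm ⊢
        linarith

-- closed-form characterisation of the carry: it is ≤ c iff 0 ≤ c and every prefix excess is ≤ c
theorem carry_le_iff (k : Int) : ∀ (l : List Int) (c : Int),
    carry k l ≤ c ↔ (0 ≤ c ∧ ∀ j : Nat, j < l.length →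
      ((l.take (j + 1)).sum) - ((j : Int) + 1) * k ≤ c) := by
  intro l
  induction l with
  | nil => intro c; simp [carry]
  | cons x rest ih =>
    intro c
    have hnn := carry_nonneg k rest
    have hc : carry k (x :: rest) = if carry k rest + x > k then carry k rest + x - k else 0 := by
      simp [carry]
    rw [hc]
    constructor
    · intro h
      have h0 : (0 : Int) ≤ c := by split_ifs at h with hgt <;> omega
      refine ⟨h0, ?_⟩
      have hr : carry k rest ≤ c + k - x := by split_ifs at h with hgt <;> omega
      obtain ⟨-, hall⟩ := (ih (c + k - x)).mp hr
      intro j hj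
      cases j with
      | zero =>
        simp only [List.take_succ_cons, List.take_zero, List.sum_cons, List.sum_nil,
          Nat.cast_zero, zero_add, add_zero, one_mul]
        omega
      | succ m =>
        have hm := hall m (by simpa using Nat.lt_of_succ_lt_succ hj)
        simp only [List.take_succ_cons, List.sum_cons] at *
        push_cast at hm ⊢
        linarith
    · rintro ⟨h0, hall⟩
      have h1 : x - k ≤ c := by
        have h2 := hall 0 (by simp)
        simp only [List.take_succ_cons, List.take_zero, List.sum_cons, List.sum_nil,
          Nat.cast_zero, zero_add, add_zero, one_mul] at h2
        exact h2
      have hr : carry k rest ≤ c + k - x := by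
        rw [ih]
        refine ⟨by omega, ?_⟩
        intro j hj
        have hm := hall (j + 1) (by simpa using Nat.succ_lt_succ hj)
        simp only [List.take_succ_cons, List.sum_cons] at hm
        push_cast at hm ⊢
        linarith
      split_ifs with hgt
      · omega
      · exact h0

-- the two Boolean results agree on every nonempty list
theorem check_eq_alt (x : Int) (l : List Int) (k : Int) :
    check (x :: l) k = check_alt (x :: l) k := by
  rw [check_eq_carry]
  unfold check_alt
  rw [Bool.eq_iff_iff, checkAltGo_iff]
  have hnn := carry_nonneg k l
  constructor
  · intro h j hj
    have hle : carry k l ≤ k - x := by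
      by_contra hc
      simp [show carry k l + x > k by omega] at h
    obtain ⟨h0, hall⟩ := (carry_le_iff k l (k - x)).mp hle
    cases j with
    | zero =>
      simp only [List.take_succ_cons, List.take_zero, List.sum_cons, List.sum_nil,
        Nat.cast_zero, zero_add, add_zero, one_mul]
      omega
    | succ m =>
      have hm := hall m (by simpa using Nat.lt_of_succ_lt_succ hj)
      simp only [List.take_succ_cons, List.sum_cons] at *
      push_cast at hm ⊢
      linarith
  · intro hall
    have h1 : x ≤ k := by
      have h2 := hall 0 (by simp)
      simp only [List.take_succ_cons, List.take_zero, List.sum_cons, List.sum_nil,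
        Nat.cast_zero, zero_add, add_zero, one_mul] at h2
      omega
    have hle : carry k l ≤ k - x := by
      rw [carry_le_iff]
      refine ⟨by omega, ?_⟩
      intro j hj
      have hm := hall (j + 1) (by simpa using Nat.succ_lt_succ hj)
      simp only [List.take_succ_cons, List.sum_cons] at hm
      push_cast at hm ⊢
      linarith
    simp [show ¬ (carry k l + x > k) by omega]

-- ===== VERDICT (by name: the statement is the Claim_ definition above) =====
theorem check_spec : Claim_equal_check := by
  intro nums k _ hpre
  unfold Spec_check
  cases nums with
  | nil => exact absurd rfl hpre
  | cons x l => exact check_eq_alt x l k
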